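-- pv_equiv track=rewrite | github.com/Spiderasasen/double-checking-my-homework | main.py | orginize
-- ===== SOURCE A (Python) =====
-- from typing import List
--
-- def orginize(message: List[str]):
--     # making 2 catigories
--     a = []
--     b = []
--
--     # adds all the letters into the correct system
--     for char in message:
--         if char == "a":
--             a.append(char)
--         elif char == "b":
--             b.append(char)
--
--     return a, b
-- ===== SOURCE B (Python) =====
-- from typing import List
--
-- def orginize(message: List[str]):
--     # count-and-build: no categorizing loop
--     return ["a"] * message.count("a"), ["b"] * message.count("b")
-- ===== Notes on version B (the rewrite author's own statement) =====
-- stated objective: idiomatic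
-- what changed: Replaced the branching append loop with two .count scans and list-repetition construction of each output.
import Mathlib
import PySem

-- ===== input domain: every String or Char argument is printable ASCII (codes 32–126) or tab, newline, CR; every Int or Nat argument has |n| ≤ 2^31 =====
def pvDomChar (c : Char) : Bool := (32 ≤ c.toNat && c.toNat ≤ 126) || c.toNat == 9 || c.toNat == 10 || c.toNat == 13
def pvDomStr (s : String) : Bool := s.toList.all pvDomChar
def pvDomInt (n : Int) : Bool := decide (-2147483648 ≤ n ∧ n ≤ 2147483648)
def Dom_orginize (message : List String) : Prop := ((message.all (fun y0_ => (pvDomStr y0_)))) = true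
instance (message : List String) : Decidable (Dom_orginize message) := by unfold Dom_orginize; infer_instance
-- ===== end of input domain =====

-- ===== PORT A =====
-- B replaces the categorizing append loop with two counts and list repetition (idiomatic).
def orginizeLoop (message : List String) (a b : List String) : List String × List String :=
  match message with
  | [] => (a, b)
  | c :: rest =>
    if c = "a" then orginizeLoop rest (a ++ [c]) b
    else if c = "b" then orginizeLoop rest a (b ++ [c])
    else orginizeLoop rest a b

def orginize (message : List String) : List String × List String :=
  orginizeLoop message [] []

-- ===== PORT B =====
def orginize_alt (message : List String) : List String × List String :=
  (List.replicate (message.count "a") "a", List.replicate (message.count "b") "b")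

-- ===== PRECONDITION & SPEC =====
def Spec_orginize (message : List String) (out : List String × List String) : Prop := out = orginize_alt message
instance (message : List String) (out : List String × List String) : Decidable (Spec_orginize message out) := by unfold Spec_orginize; infer_instance

-- ===== CLAIM (what is proved, stated in full; the proofs are below) =====
def Claim_equal_orginize : Prop := ∀ (message : List String), Dom_orginize message → Spec_orginize message (orginize message)

-- ===== LEMMAS AND PROOFS =====

-- ===== VERDICT (by name: the statement is the Claim_ definition above) =====
theorem orginizeLoop_eq (message : List String) : ∀ (a b : List String),
    orginizeLoop message a b =
      (a ++ List.replicate (message.count "a") "a",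
       b ++ List.replicate (message.count "b") "b") := by
  induction message with
  | nil => intro a b; simp [orginizeLoop]
  | cons c rest ih =>
    intro a b
    by_cases ha : c = "a"
    · subst ha
      simp [orginizeLoop, ih, List.count_cons, List.replicate_succ, List.append_assoc]
    · by_cases hb : c = "b"
      · subst hb
        simp [orginizeLoop, ih, List.count_cons, List.replicate_succ, List.append_assoc]
      · simp [orginizeLoop, ha, hb, ih, List.count_cons]

theorem orginize_spec : Claim_equal_orginize := by
  intro message _
  unfold Spec_orginize orginize orginize_alt
  simp [orginizeLoop_eq]
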